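-- pv_equiv track=rewrite | github.com/OlaszPL/Introduction_to_computer_science_course | Zestaw4/zad4.py | zad4
-- ===== SOURCE A (Python) =====
-- def zad4(T):
--     n = len(T)
--     max_column_sum = -float('inf')
--     min_row_sum = float('inf')
--     res_row, res_column = 0, 0 # result
--
--     for row in range(n):
--         tmp_row_sum = 0
--         for column in range(n):
--             tmp_row_sum += T[row][column]
--
--         if tmp_row_sum < min_row_sum:
--             min_row_sum = tmp_row_sum
--             res_row = row
--
--     for column in range(n):
--         tmp_column_sum = 0
--         for row in range(n):
--             tmp_column_sum += T[row][column]
--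
--         if tmp_column_sum > max_column_sum:
--             max_column_sum = tmp_column_sum
--             res_column = column
--
--     return(res_row, res_column)
-- ===== SOURCE B (Python) =====
-- def zad4(T):
--     n = len(T)
--     row_sums = [0] * n
--     col_sums = [0] * n
--     for i, row in enumerate(T):
--         for j in range(n):
--             v = row[j]
--             row_sums[i] += v
--             col_sums[j] += v
--     res_row = 0
--     for i in range(1, n):
--         if row_sums[i] < row_sums[res_row]:
--             res_row = i
--     res_column = 0
--     for j in range(1, n):
--         if col_sums[j] > col_sums[res_column]:
--             res_column = j
--     return (res_row, res_column)
-- ===== Notes on version B (the rewrite author's own statement) =====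
-- stated objective: alternative
-- what changed: A recomputes each row sum and each column sum with two separate doubly-nested argmin/argmax loops over T[row][column]; B makes one accumulation pass filling a row-sum table and a column-sum table simultaneously, then finds the first-minimal and first-maximal indices with two separate linear scans over those tables.
import Mathlib
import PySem

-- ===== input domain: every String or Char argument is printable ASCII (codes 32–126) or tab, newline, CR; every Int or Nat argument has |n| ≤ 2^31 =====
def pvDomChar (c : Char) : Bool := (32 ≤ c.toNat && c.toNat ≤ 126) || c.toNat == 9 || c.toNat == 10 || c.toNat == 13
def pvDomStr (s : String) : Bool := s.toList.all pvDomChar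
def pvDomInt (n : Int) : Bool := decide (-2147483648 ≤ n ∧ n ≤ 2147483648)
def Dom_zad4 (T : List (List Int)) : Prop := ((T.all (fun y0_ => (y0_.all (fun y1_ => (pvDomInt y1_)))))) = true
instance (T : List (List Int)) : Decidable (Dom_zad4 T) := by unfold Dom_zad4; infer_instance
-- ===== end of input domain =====

-- B replaces A's two separate quadratic argmin/argmax loops (each re-summing rows/columns)
-- by one accumulation pass filling row-sum and column-sum tables, followed by two linear scans;
-- objective: alternative decomposition (same asymptotic cost).

-- ===== PORT A =====
def zad4 (T : List (List Int)) : Int × Int :=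
  let n : Int := (T.length : Int)
  let s1 :=
    (PySem.List.pyRange 0 n 1).foldl
      (fun (st : Option Int × Int) row =>
        let tmp :=
          (PySem.List.pyRange 0 n 1).foldl
            (fun acc column => acc + PySem.List.pyGetD (PySem.List.pyGetD T row []) column 0) 0
        match st.1 with
        | none => (some tmp, row)                         -- tmp < float('inf') always holds
        | some m => if tmp < m then (some tmp, row) else st)
      ((none : Option Int), (0 : Int))
  let s2 :=
    (PySem.List.pyRange 0 n 1).foldl
      (fun (st : Option Int × Int) column =>
        let tmp :=
          (PySem.List.pyRange 0 n 1).foldl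
            (fun acc row => acc + PySem.List.pyGetD (PySem.List.pyGetD T row []) column 0) 0
        match st.1 with
        | none => (some tmp, column)                      -- tmp > -float('inf') always holds
        | some m => if m < tmp then (some tmp, column) else st)
      ((none : Option Int), (0 : Int))
  (s1.2, s2.2)

-- ===== PORT B =====
def zad4_alt (T : List (List Int)) : Int × Int :=
  let n : Int := (T.length : Int)
  let init : List Int := List.replicate T.length 0
  let sums :=
    (PySem.List.enumerate T 0).foldl
      (fun (st : List Int × List Int) p =>
        (PySem.List.pyRange 0 n 1).foldl
          (fun (st2 : List Int × List Int) j =>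
            let v := PySem.List.pyGetD p.2 j 0
            (PySem.List.pySetD st2.1 p.1 (PySem.List.pyGetD st2.1 p.1 0 + v),
             PySem.List.pySetD st2.2 j (PySem.List.pyGetD st2.2 j 0 + v)))
          st)
      (init, init)
  let resRow :=
    (PySem.List.pyRange 1 n 1).foldl
      (fun r i => if PySem.List.pyGetD sums.1 i 0 < PySem.List.pyGetD sums.1 r 0 then i else r) 0
  let resColumn :=
    (PySem.List.pyRange 1 n 1).foldl
      (fun r j => if PySem.List.pyGetD sums.2 r 0 < PySem.List.pyGetD sums.2 j 0 then j else r) 0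
  (resRow, resColumn)

-- ===== PRECONDITION & SPEC =====
-- Python A indexes T[row][column] for all row, column < len(T): it raises IndexError iff some
-- row of T is shorter than len(T).  Pre_ excludes exactly those inputs.
def Pre_zad4 (T : List (List Int)) : Prop := ∀ r ∈ T, T.length ≤ r.length
instance (T : List (List Int)) : Decidable (Pre_zad4 T) := by unfold Pre_zad4; infer_instance

def pvWitness_zad4 : List (List Int) := [[1, 2], [3, 4]]

def Spec_zad4 (T : List (List Int)) (out : Int × Int) : Prop := out = zad4_alt T
instance (T : List (List Int)) (out : Int × Int) : Decidable (Spec_zad4 T out) := by unfold Spec_zad4; infer_instance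

-- ===== CLAIM (what is proved, stated in full; the proofs are below) =====
def Claim_equal_zad4 : Prop := ∀ (T : List (List Int)), Dom_zad4 T → Pre_zad4 T → Spec_zad4 T (zad4 T)

-- ===== LEMMAS AND PROOFS =====

-- sum of the first m entries of a row, as A's inner row loop computes it
def rSum (m : Int) (row : List Int) : Int :=
  (PySem.List.pyRange 0 m 1).foldl (fun acc j => acc + PySem.List.pyGetD row j 0) 0

-- column sum over a list of rows
def cSum (j : Int) (rows : List (List Int)) : Int :=
  rows.foldl (fun acc row => acc + PySem.List.pyGetD row j 0) 0

-- B's two linear scans, as standalone functions of the table being scanned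
def scanMin (f : Int → Int) (n : Int) : Int :=
  (PySem.List.pyRange 1 n 1).foldl (fun r i => if f i < f r then i else r) 0
def scanMax (f : Int → Int) (n : Int) : Int :=
  (PySem.List.pyRange 1 n 1).foldl (fun r i => if f r < f i then i else r) 0

-- the two halves of B's accumulation pass, separated
def rowsFold (b : Int) (rows : List (List Int)) (k : Int) (rs : List Int) : List Int :=
  (PySem.List.enumerate rows k).foldl
    (fun rs2 p =>
      (PySem.List.pyRange 0 b 1).foldl
        (fun rs3 j => PySem.List.pySetD rs3 p.1 (PySem.List.pyGetD rs3 p.1 0 + PySem.List.pyGetD p.2 j 0)) rs2)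
    rs
def colsFold (b : Int) (rows : List (List Int)) (k : Int) (cs : List Int) : List Int :=
  (PySem.List.enumerate rows k).foldl
    (fun cs2 p =>
      (PySem.List.pyRange 0 b 1).foldl
        (fun cs3 j => PySem.List.pySetD cs3 j (PySem.List.pyGetD cs3 j 0 + PySem.List.pyGetD p.2 j 0)) cs2)
    cs

lemma minFold_pair (f : Int → Int) (n : Nat) (hn : 0 < n) :
    (PySem.List.pyRange 0 (n : Int) 1).foldl
      (fun (st : Option Int × Int) row =>
        match st.1 with
        | none => (some (f row), row)
        | some m => if f row < m then (some (f row), row) else st)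
      ((none : Option Int), (0 : Int))
    = (some (f (scanMin f n)), scanMin f n) := by
  induction n with
  | zero => omega
  | succ n ih =>
    rcases Nat.eq_zero_or_pos n with h0 | hpos
    · subst h0
      have h1 : ((1:Nat) : Int) = 0 + 1 := by norm_num
      rw [h1, PySem.List.pyRange_one_succ_right (by norm_num)]
      simp [scanMin, PySem.List.pyRange_one_eq_nil]
    · have hcast : ((n+1 : Nat) : Int) = (n : Int) + 1 := by push_cast; ring
      have hs : scanMin f ((n:Int)+1) = if f n < f (scanMin f n) then (n:Int) else scanMin f n := by
        unfold scanMin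
        rw [PySem.List.pyRange_one_succ_right (by exact_mod_cast hpos), List.foldl_append]
        simp
      rw [hcast, PySem.List.pyRange_one_succ_right (by positivity), List.foldl_append, ih hpos, hs]
      simp only [List.foldl_cons, List.foldl_nil]
      split_ifs <;> simp

lemma scanMin_aux (g f : Int → Int) (n : Nat) (h : ∀ i : Nat, i < n → g i = f i) :
    scanMin g n = scanMin f n ∧ 0 ≤ scanMin g n ∧ scanMin g n < max n 1 := by
  induction n with
  | zero => simp [scanMin, PySem.List.pyRange_one_eq_nil]
  | succ n ih =>
    rcases Nat.eq_zero_or_pos n with h0 | hpos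
    · subst h0
      simp [scanMin, PySem.List.pyRange_one_eq_nil]
    · obtain ⟨he, hge, hlt⟩ := ih (fun i hi => h i (by omega))
      have hmax : (max n 1) = n := by omega
      rw [hmax] at hlt
      have hcast : ((n+1 : Nat) : Int) = (n : Int) + 1 := by push_cast; ring
      have hsg : scanMin g ((n:Int)+1) = if g n < g (scanMin g n) then (n:Int) else scanMin g n := by
        unfold scanMin
        rw [PySem.List.pyRange_one_succ_right (by exact_mod_cast hpos), List.foldl_append]
        simp
      have hsf : scanMin f ((n:Int)+1) = if f n < f (scanMin f n) then (n:Int) else scanMin f n := by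
        unfold scanMin
        rw [PySem.List.pyRange_one_succ_right (by exact_mod_cast hpos), List.foldl_append]
        simp
      have hgs : g (scanMin g n) = f (scanMin f n) := by
        rw [he]
        have : scanMin f (n:Int) = ((scanMin f n).toNat : Int) := by omega
        rw [this]
        exact h _ (by omega)
      rw [hcast, hsg, hsf, hgs, h n (by omega), he]
      constructor
      · rfl
      · split_ifs <;> push_cast <;> omega

lemma maxFold_pair (f : Int → Int) (n : Nat) (hn : 0 < n) :
    (PySem.List.pyRange 0 (n : Int) 1).foldl
      (fun (st : Option Int × Int) col =>
        match st.1 with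
        | none => (some (f col), col)
        | some m => if m < f col then (some (f col), col) else st)
      ((none : Option Int), (0 : Int))
    = (some (f (scanMax f n)), scanMax f n) := by
  induction n with
  | zero => omega
  | succ n ih =>
    rcases Nat.eq_zero_or_pos n with h0 | hpos
    · subst h0
      have h1 : ((1:Nat) : Int) = 0 + 1 := by norm_num
      rw [h1, PySem.List.pyRange_one_succ_right (by norm_num)]
      simp [scanMax, PySem.List.pyRange_one_eq_nil]
    · have hcast : ((n+1 : Nat) : Int) = (n : Int) + 1 := by push_cast; ring
      have hs : scanMax f ((n:Int)+1) = if f (scanMax f n) < f n then (n:Int) else scanMax f n := by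
        unfold scanMax
        rw [PySem.List.pyRange_one_succ_right (by exact_mod_cast hpos), List.foldl_append]
        simp
      rw [hcast, PySem.List.pyRange_one_succ_right (by positivity), List.foldl_append, ih hpos, hs]
      simp only [List.foldl_cons, List.foldl_nil]
      split_ifs <;> simp

lemma scanMax_aux (g f : Int → Int) (n : Nat) (h : ∀ i : Nat, i < n → g i = f i) :
    scanMax g n = scanMax f n ∧ 0 ≤ scanMax g n ∧ scanMax g n < max n 1 := by
  induction n with
  | zero => simp [scanMax, PySem.List.pyRange_one_eq_nil]
  | succ n ih =>
    rcases Nat.eq_zero_or_pos n with h0 | hpos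
    · subst h0
      simp [scanMax, PySem.List.pyRange_one_eq_nil]
    · obtain ⟨he, hge, hlt⟩ := ih (fun i hi => h i (by omega))
      have hmax : (max n 1) = n := by omega
      rw [hmax] at hlt
      have hcast : ((n+1 : Nat) : Int) = (n : Int) + 1 := by push_cast; ring
      have hsg : scanMax g ((n:Int)+1) = if g (scanMax g n) < g n then (n:Int) else scanMax g n := by
        unfold scanMax
        rw [PySem.List.pyRange_one_succ_right (by exact_mod_cast hpos), List.foldl_append]
        simp
      have hsf : scanMax f ((n:Int)+1) = if f (scanMax f n) < f n then (n:Int) else scanMax f n := by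
        unfold scanMax
        rw [PySem.List.pyRange_one_succ_right (by exact_mod_cast hpos), List.foldl_append]
        simp
      have hgs : g (scanMax g n) = f (scanMax f n) := by
        rw [he]
        have : scanMax f (n:Int) = ((scanMax f n).toNat : Int) := by omega
        rw [this]
        exact h _ (by omega)
      rw [hcast, hsg, hsf, hgs, h n (by omega), he]
      constructor
      · rfl
      · split_ifs <;> push_cast <;> omega

lemma rSum_succ (m : Nat) (row : List Int) :
    rSum ((m : Int) + 1) row = rSum m row + PySem.List.pyGetD row m 0 := by
  unfold rSum
  rw [PySem.List.pyRange_one_succ_right (by positivity), List.foldl_append]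
  simp

lemma rowStep_eq (rs : List Int) (i : Nat) (hi : i < rs.length) (row : List Int) (m : Nat) :
    (PySem.List.pyRange 0 (m : Int) 1).foldl
      (fun rs2 j => PySem.List.pySetD rs2 (i : Int) (PySem.List.pyGetD rs2 (i : Int) 0 + PySem.List.pyGetD row j 0)) rs
    = rs.set i (rs.getD i 0 + rSum m row) := by
  induction m with
  | zero =>
    simp [rSum, PySem.List.pyRange, List.getElem?_eq_getElem hi, List.set_getElem_self]
  | succ m ih =>
    have hcast : ((m + 1 : Nat) : Int) = (m : Int) + 1 := by push_cast; ring
    rw [hcast, PySem.List.pyRange_one_succ_right (by positivity), List.foldl_append, ih, rSum_succ]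
    simp only [List.foldl_cons, List.foldl_nil]
    rw [PySem.List.pySetD_natCast, PySem.List.pyGetD_natCast, List.set_set,
      List.getD_eq_getElem _ 0 (by simpa using hi),
      List.getElem_set_self (by simpa using hi), add_assoc]

lemma selfMap (cs : List Int) : (List.range cs.length).map (fun j => cs.getD j 0) = cs := by
  apply List.ext_getElem (by simp)
  intro j hj1 hj2
  simp [List.getElem?_eq_getElem hj2]

lemma colStep_partial (cs : List Int) (row : List Int) (m : Nat) (hm : m ≤ cs.length) :
    (PySem.List.pyRange 0 (m : Int) 1).foldl
      (fun cs2 j => PySem.List.pySetD cs2 j (PySem.List.pyGetD cs2 j 0 + PySem.List.pyGetD row j 0)) cs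
    = (List.range cs.length).map (fun j => cs.getD j 0 + if j < m then PySem.List.pyGetD row (j : Int) 0 else 0) := by
  induction m with
  | zero =>
    simp only [Nat.cast_zero, PySem.List.pyRange_one_eq_nil (le_refl 0), List.foldl_nil]
    simp only [Nat.not_lt_zero, if_false, add_zero]
    exact (selfMap cs).symm
  | succ m ih =>
    have hcast : ((m + 1 : Nat) : Int) = (m : Int) + 1 := by push_cast; ring
    rw [hcast, PySem.List.pyRange_one_succ_right (by positivity), List.foldl_append,
      ih (by omega)]
    simp only [List.foldl_cons, List.foldl_nil]
    rw [PySem.List.pySetD_natCast, PySem.List.pyGetD_natCast]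
    have hmlt : m < ((List.range cs.length).map
        (fun j => cs.getD j 0 + if j < m then PySem.List.pyGetD row (j : Int) 0 else 0)).length := by
      simpa using (by omega : m < cs.length)
    rw [List.getD_eq_getElem _ 0 hmlt]
    apply List.ext_getElem (by simp)
    intro j hj1 hj2
    rw [List.getElem_set]
    rcases eq_or_ne m j with rfl | hne
    · simp
    · have hj : j < cs.length := by simpa using hj2
      simp only [if_neg hne, List.getElem_map, List.getElem_range]
      by_cases hjm : j < m
      · simp [hjm, (by omega : j < m + 1)]
      · simp [hjm]
        intro hle
        exact absurd hle (by omega)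

lemma rowsFold_spec (b : Nat) (rows : List (List Int)) (k : Nat) (rs : List Int)
    (h : k + rows.length ≤ rs.length) :
    (rowsFold b rows k rs).length = rs.length ∧
      ∀ j : Nat, j < rs.length →
        (rowsFold b rows k rs).getD j 0 =
          if k ≤ j ∧ j < k + rows.length then rs.getD j 0 + rSum b (rows.getD (j - k) []) else rs.getD j 0 := by
  induction rows generalizing k rs with
  | nil =>
    refine ⟨by simp [rowsFold, PySem.List.enumerate_nil], ?_⟩
    intro j hj
    rw [if_neg (by rintro ⟨h1, h2⟩; simp at h2; omega)]
    simp [rowsFold, PySem.List.enumerate_nil]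
  | cons row rows ih =>
    have h' : k + rows.length + 1 ≤ rs.length := by simp at h; omega
    have hk : k < rs.length := by omega
    have hstep : rowsFold b (row :: rows) k rs
        = rowsFold b rows ((k : Int) + 1) (rs.set k (rs.getD k 0 + rSum b row)) := by
      unfold rowsFold
      rw [PySem.List.enumerate_cons, List.foldl_cons, rowStep_eq rs k hk row b]
    have hcast : ((k + 1 : Nat) : Int) = (k : Int) + 1 := by push_cast; ring
    obtain ⟨ihlen, ihget⟩ := ih (k + 1) (rs.set k (rs.getD k 0 + rSum b row)) (by simp only [List.length_set]; omega)
    rw [hcast] at ihlen ihget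
    constructor
    · rw [hstep, ihlen]; simp
    · intro j hj
      rw [hstep, ihget j (by simpa using hj)]
      have hset : ∀ jj : Nat, jj < rs.length →
          (rs.set k (rs.getD k 0 + rSum b row)).getD jj 0
            = if jj = k then rs.getD k 0 + rSum b row else rs.getD jj 0 := by
        intro jj hjj
        rw [List.getD_eq_getElem _ 0 (by simpa using hjj), List.getElem_set]
        split_ifs with h1 h2 h3
        · rfl
        · omega
        · omega
        · rw [List.getD_eq_getElem _ 0 hjj]
      by_cases hjk : j = k
      · subst hjk
        rw [if_neg (by omega), hset j hj, if_pos rfl, if_pos ⟨le_refl _, by simp only [List.length_cons]; omega⟩]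
        simp
      · by_cases hin : k + 1 ≤ j ∧ j < k + 1 + rows.length
        · rw [if_pos hin, hset j hj, if_neg hjk, if_pos (by simp only [List.length_cons]; omega)]
          have : j - k = (j - (k + 1)) + 1 := by omega
          rw [this]
          rfl
        · rw [if_neg hin, hset j hj, if_neg hjk, if_neg (by simp only [List.length_cons]; omega)]

lemma colsFold_spec (rows : List (List Int)) (n : Nat) (k : Int) (cs : List Int) (h : cs.length = n) :
    (colsFold n rows k cs).length = n ∧
      ∀ j : Nat, j < n → (colsFold n rows k cs).getD j 0 = cs.getD j 0 + cSum j rows := by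
  induction rows generalizing k cs with
  | nil =>
    refine ⟨by simp [colsFold, PySem.List.enumerate_nil, h], ?_⟩
    intro j hj
    simp [colsFold, PySem.List.enumerate_nil, cSum]
  | cons row rows ih =>
    have hstep : colsFold n (row :: rows) k cs
        = colsFold n rows (k + 1)
            ((List.range cs.length).map (fun j => cs.getD j 0 + if j < n then PySem.List.pyGetD row (j : Int) 0 else 0)) := by
      unfold colsFold
      rw [PySem.List.enumerate_cons, List.foldl_cons, colStep_partial cs row n (by omega)]
    obtain ⟨ihlen, ihget⟩ := ih (k + 1)
      ((List.range cs.length).map (fun j => cs.getD j 0 + if j < n then PySem.List.pyGetD row (j : Int) 0 else 0))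
      (by simp [h])
    refine ⟨by rw [hstep, ihlen], ?_⟩
    intro j hj
    rw [hstep, ihget j hj]
    have hjlen : j < cs.length := by omega
    have hmap : ((List.range cs.length).map
        (fun j => cs.getD j 0 + if j < n then PySem.List.pyGetD row (j : Int) 0 else 0)).getD j 0
        = cs.getD j 0 + PySem.List.pyGetD row (j : Int) 0 := by
      rw [List.getD_eq_getElem _ 0 (by simpa using hjlen)]
      simp [hj]
    rw [hmap]
    have hcons : cSum j (row :: rows) = PySem.List.pyGetD row (j : Int) 0 + cSum j rows := by
      unfold cSum
      rw [List.foldl_cons, PySem.List.foldl_add, PySem.List.foldl_add]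
      ring
    rw [hcons]
    ring


lemma foldl_enum_split (b : Int) (rows : List (List Int)) (k : Int) (rs cs : List Int) :
    (PySem.List.enumerate rows k).foldl
      (fun (st : List Int × List Int) p =>
        (PySem.List.pyRange 0 b 1).foldl
          (fun st2 j =>
            (PySem.List.pySetD st2.1 p.1 (PySem.List.pyGetD st2.1 p.1 0 + PySem.List.pyGetD p.2 j 0),
             PySem.List.pySetD st2.2 j (PySem.List.pyGetD st2.2 j 0 + PySem.List.pyGetD p.2 j 0)))
          st)
      (rs, cs)
    = (rowsFold b rows k rs, colsFold b rows k cs) := by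
  have hstep : (fun (st : List Int × List Int) (p : Int × List Int) =>
        (PySem.List.pyRange 0 b 1).foldl
          (fun st2 j =>
            (PySem.List.pySetD st2.1 p.1 (PySem.List.pyGetD st2.1 p.1 0 + PySem.List.pyGetD p.2 j 0),
             PySem.List.pySetD st2.2 j (PySem.List.pyGetD st2.2 j 0 + PySem.List.pyGetD p.2 j 0)))
          st)
      = fun (st : List Int × List Int) (p : Int × List Int) =>
          ((PySem.List.pyRange 0 b 1).foldl
             (fun a j => PySem.List.pySetD a p.1 (PySem.List.pyGetD a p.1 0 + PySem.List.pyGetD p.2 j 0)) st.1,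
           (PySem.List.pyRange 0 b 1).foldl
             (fun a j => PySem.List.pySetD a j (PySem.List.pyGetD a j 0 + PySem.List.pyGetD p.2 j 0)) st.2) := by
    funext st p
    obtain ⟨x, y⟩ := st
    exact PySem.List.foldl_prod_mk
      (fun a j => PySem.List.pySetD a p.1 (PySem.List.pyGetD a p.1 0 + PySem.List.pyGetD p.2 j 0))
      (fun a j => PySem.List.pySetD a j (PySem.List.pyGetD a j 0 + PySem.List.pyGetD p.2 j 0))
      (PySem.List.pyRange 0 b 1) x y
  rw [hstep, PySem.List.foldl_prod_mk
    (fun a p => (PySem.List.pyRange 0 b 1).foldl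
      (fun a2 j => PySem.List.pySetD a2 (Prod.fst p) (PySem.List.pyGetD a2 (Prod.fst p) 0 + PySem.List.pyGetD (Prod.snd p) j 0)) a)
    (fun a p => (PySem.List.pyRange 0 b 1).foldl
      (fun a2 j => PySem.List.pySetD a2 j (PySem.List.pyGetD a2 j 0 + PySem.List.pyGetD (Prod.snd p) j 0)) a)
    (PySem.List.enumerate rows k) rs cs]
  rfl

-- ===== VERDICT (by name: the statement is the Claim_ definition above) =====
theorem zad4_spec : Claim_equal_zad4 := by
  intro T _ _
  show zad4 T = zad4_alt T
  rcases Nat.eq_zero_or_pos T.length with h0 | hn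
  · rw [List.length_eq_zero_iff] at h0
    subst h0
    rfl
  simp only [zad4, zad4_alt]
  rw [foldl_enum_split ((T.length : Int)) T 0 (List.replicate T.length 0) (List.replicate T.length 0)]
  have hrows := rowsFold_spec T.length T 0 (List.replicate T.length 0) (by simp)
  simp only [Nat.cast_zero] at hrows
  have hcols := colsFold_spec T T.length 0 (List.replicate T.length 0) (by simp)
  have hptMin : ∀ i : Nat, i < T.length →
      (fun i : Int => PySem.List.pyGetD (rowsFold (T.length : Int) T 0 (List.replicate T.length 0)) i 0) i
        = (fun row : Int => rSum (T.length : Int) (PySem.List.pyGetD T row [])) i := by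
    intro i hi
    simp only [PySem.List.pyGetD_natCast]
    rw [hrows.2 i (by simpa using hi), if_pos (by omega)]
    simp
  have hptMax : ∀ j : Nat, j < T.length →
      (fun j : Int => PySem.List.pyGetD (colsFold (T.length : Int) T 0 (List.replicate T.length 0)) j 0) j
        = (fun col : Int => cSum col T) j := by
    intro j hj
    simp only [PySem.List.pyGetD_natCast]
    rw [hcols.2 j hj]
    simp
  rw [Prod.mk.injEq]
  constructor
  · exact (congrArg Prod.snd (minFold_pair
        (fun row : Int => rSum (T.length : Int) (PySem.List.pyGetD T row [])) T.length hn)).trans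
      (scanMin_aux
        (fun i : Int => PySem.List.pyGetD (rowsFold (T.length : Int) T 0 (List.replicate T.length 0)) i 0)
        (fun row : Int => rSum (T.length : Int) (PySem.List.pyGetD T row [])) T.length hptMin).1.symm
  · have hcolfun : (fun col : Int =>
        (PySem.List.pyRange 0 (T.length : Int) 1).foldl
          (fun acc row => acc + PySem.List.pyGetD (PySem.List.pyGetD T row []) col 0) 0)
        = fun col : Int => cSum col T := by
      funext col
      have := PySem.List.foldl_pyRange_zero_pyGetD T ([] : List Int)
        (fun acc row => acc + PySem.List.pyGetD row col 0) 0
      simpa [cSum] using this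
    exact (congrArg Prod.snd (maxFold_pair (fun col : Int =>
        (PySem.List.pyRange 0 (T.length : Int) 1).foldl
          (fun acc row => acc + PySem.List.pyGetD (PySem.List.pyGetD T row []) col 0) 0) T.length hn)).trans
      ((congrArg (fun f : Int → Int => scanMax f (T.length : Int)) hcolfun).trans
        (scanMax_aux
          (fun j : Int => PySem.List.pyGetD (colsFold (T.length : Int) T 0 (List.replicate T.length 0)) j 0)
          (fun col : Int => cSum col T) T.length hptMax).1.symm)
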